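-- pv_equiv track=rewrite | github.com/SearchingForSea/Software_Test_Project | backend/app01/views.py | scan_index
-- ===== SOURCE A (Python) =====
-- def scan_index(list1, redistribution_list, shard_length):
--     remain_list = []
--     for i in range(len(list1)):
--         bo = False
--         for j in range(i + 1, len(list1)):
--             if list1[i].get('index') == list1[j].get('index'):
--                 redistribution_list.append(list1[i])
--                 bo = True
--                 break
--         if not bo:
--             if len(remain_list) < shard_length:
--                 remain_list.append(list1[i])
--             else:
--                 redistribution_list.append(list1[i])
--     return remain_list
-- ===== SOURCE B (Python) =====
-- def scan_index(list1, redistribution_list, shard_length):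
--     # One reverse pass computes, for each element, whether a later element
--     # shares its 'index' value; then a single forward pass partitions.
--     seen = set()
--     dup = [False] * len(list1)
--     for pos in range(len(list1) - 1, -1, -1):
--         k = list1[pos].get('index')
--         dup[pos] = k in seen
--         seen.add(k)
--     remain_list = []
--     for d, isdup in zip(list1, dup):
--         if isdup:
--             redistribution_list.append(d)
--         elif len(remain_list) < shard_length:
--             remain_list.append(d)
--         else:
--             redistribution_list.append(d)
--     return remain_list
-- ===== Notes on version B (the rewrite author's own statement) =====
-- stated objective: alternative
-- what changed: A's per-element rescan of the tail (quadratic in the worst case) is replaced by one reverse pass building a set of later 'index' values plus one forward partitioning pass; on the probe's duplicate-heavy inputs A's inner loop breaks early, so no speed-up was measured.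
import Mathlib
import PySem

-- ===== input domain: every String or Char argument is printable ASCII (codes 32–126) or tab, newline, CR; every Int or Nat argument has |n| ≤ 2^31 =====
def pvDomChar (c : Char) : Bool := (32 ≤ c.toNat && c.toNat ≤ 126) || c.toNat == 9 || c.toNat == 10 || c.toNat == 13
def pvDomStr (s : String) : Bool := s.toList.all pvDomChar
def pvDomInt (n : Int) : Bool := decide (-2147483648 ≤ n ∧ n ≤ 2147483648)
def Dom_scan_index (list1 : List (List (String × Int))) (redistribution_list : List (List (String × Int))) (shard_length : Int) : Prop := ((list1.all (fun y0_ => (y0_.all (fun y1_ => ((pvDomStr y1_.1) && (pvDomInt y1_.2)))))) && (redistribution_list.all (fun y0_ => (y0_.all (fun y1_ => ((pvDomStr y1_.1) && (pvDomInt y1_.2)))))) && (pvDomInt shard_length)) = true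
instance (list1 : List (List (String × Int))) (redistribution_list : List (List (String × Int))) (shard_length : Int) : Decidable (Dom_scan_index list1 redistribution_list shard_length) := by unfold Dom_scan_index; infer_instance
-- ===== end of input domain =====

-- B replaces A's per-element tail rescan by a reverse pass building a set of later
-- 'index' values plus one forward partitioning pass (objective: alternative).
-- A (and B identically) appends to the redistribution_list argument in place; the
-- equivalence proved here is about the return value (the ports thread that list as state).


-- shared helper: d.get('index') on the association-list dict
def pvKey (d : List (String × Int)) : Option Int := PySem.Dict.get? (PySem.Dict.mk d) "index"

-- ===== PORT A =====
-- outer 'for i in range(len(list1))' as structural recursion on the suffix;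
-- the inner 'for j in range(i+1, len(list1))' with break is the first-match scan of the tail
def scanAGo (shard_length : Int) :
    List (List (String × Int)) →
    List (List (String × Int)) × List (List (String × Int)) →
    List (List (String × Int)) × List (List (String × Int))
  | [], st => st
  | d :: rest, (remain, red) =>
    let bo := rest.any (fun e => pvKey d == pvKey e)
    if bo then scanAGo shard_length rest (remain, red ++ [d])
    else if (remain.length : Int) < shard_length then scanAGo shard_length rest (remain ++ [d], red)
    else scanAGo shard_length rest (remain, red ++ [d])

def scan_index (list1 : List (List (String × Int))) (redistribution_list : List (List (String × Int))) (shard_length : Int) : List (List (String × Int)) :=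
  (scanAGo shard_length list1 ([], redistribution_list)).1

-- ===== PORT B =====
-- reverse pass: returns (set of keys of the list, per-element flag "key occurs later")
def pvDupFlags : List (List (String × Int)) → PySem.Set (Option Int) × List Bool
  | [] => (PySem.Set.empty, [])
  | d :: rest =>
    let (seen, flags) := pvDupFlags rest
    (PySem.Set.add seen (pvKey d), PySem.Set.contains seen (pvKey d) :: flags)

def scan_index_alt (list1 : List (List (String × Int))) (redistribution_list : List (List (String × Int))) (shard_length : Int) : List (List (String × Int)) :=
  ((list1.zip (pvDupFlags list1).2).foldl
    (fun (st : List (List (String × Int)) × List (List (String × Int))) p =>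
      if p.2 then (st.1, st.2 ++ [p.1])
      else if (st.1.length : Int) < shard_length then (st.1 ++ [p.1], st.2)
      else (st.1, st.2 ++ [p.1]))
    ([], redistribution_list)).1

-- ===== PRECONDITION & SPEC =====
def Spec_scan_index (list1 : List (List (String × Int))) (redistribution_list : List (List (String × Int))) (shard_length : Int) (out : List (List (String × Int))) : Prop := out = scan_index_alt list1 redistribution_list shard_length
instance (list1 : List (List (String × Int))) (redistribution_list : List (List (String × Int))) (shard_length : Int) (out : List (List (String × Int))) : Decidable (Spec_scan_index list1 redistribution_list shard_length out) := by unfold Spec_scan_index; infer_instance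

-- ===== CLAIM (what is proved, stated in full; the proofs are below) =====
def Claim_equal_scan_index : Prop := ∀ (list1 : List (List (String × Int))) (redistribution_list : List (List (String × Int))) (shard_length : Int), Dom_scan_index list1 redistribution_list shard_length → Spec_scan_index list1 redistribution_list shard_length (scan_index list1 redistribution_list shard_length)

-- ===== LEMMAS AND PROOFS =====

-- the set built by the reverse pass answers exactly A's inner tail scan
theorem pvDupFlags_contains (l : List (List (String × Int))) (k : Option Int) :
    PySem.Set.contains (pvDupFlags l).1 k = l.any (fun e => k == pvKey e) := by
  induction l with
  | nil => rfl
  | cons d rest ih =>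
    simp only [pvDupFlags, List.any_cons, ← ih]
    simp [pysem, beq_eq_decide, Bool.or_comm]

-- the two state machines coincide, for any starting state
theorem scanAGo_eq (sl : Int) (l : List (List (String × Int)))
    (st : List (List (String × Int)) × List (List (String × Int))) :
    scanAGo sl l st =
      (l.zip (pvDupFlags l).2).foldl
        (fun st p =>
          if p.2 then (st.1, st.2 ++ [p.1])
          else if (st.1.length : Int) < sl then (st.1 ++ [p.1], st.2)
          else (st.1, st.2 ++ [p.1]))
        st := by
  induction l generalizing st with
  | nil => rfl
  | cons d rest ih =>
    obtain ⟨remain, red⟩ := st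
    simp only [scanAGo, pvDupFlags, List.zip_cons_cons, List.foldl_cons, ← pvDupFlags_contains]
    split_ifs <;> exact ih _

-- ===== VERDICT (by name: the statement is the Claim_ definition above) =====
theorem scan_index_spec : Claim_equal_scan_index := by
  intro l1 rl sl _
  unfold Spec_scan_index scan_index scan_index_alt
  rw [scanAGo_eq]
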